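-- pv_equiv track=rewrite | github.com/siddhantw/the-vortex | scripts/gen_ai/use_cases/security_penetration_testing.py | _calculate_ssl_grade
-- ===== SOURCE A (Python) =====
-- from typing import Dict, List, Any, Optional
--
-- def _calculate_ssl_grade(ssl_results: Dict) -> str:
--     """Calculate SSL grade based on configuration"""
--     score = 100
--
--     if not ssl_results.get("has_ssl"):
--         return "F"
--
--     # Deduct points for vulnerabilities
--     for vuln in ssl_results.get("vulnerabilities", []):
--         if vuln["severity"] == "High":
--             score -= 30
--         elif vuln["severity"] == "Medium":
--             score -= 15
--         else:
--             score -= 5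
--
--     if score >= 90:
--         return "A+"
--     elif score >= 80:
--         return "A"
--     elif score >= 70:
--         return "B"
--     elif score >= 60:
--         return "C"
--     elif score >= 50:
--         return "D"
--     else:
--         return "F"
-- ===== SOURCE B (Python) =====
-- def _calculate_ssl_grade(ssl_results):
--     """Calculate SSL grade based on configuration"""
--     if not ssl_results.get("has_ssl"):
--         return "F"
--     severities = [v["severity"] for v in ssl_results.get("vulnerabilities", [])]
--     score = (100 - 5 * len(severities)
--              - 25 * severities.count("High")
--              - 10 * severities.count("Medium"))
--     thresholds = [50, 60, 70, 80, 90]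
--     grades = ["F", "D", "C", "B", "A", "A+"]
--     lo, hi = 0, len(thresholds)
--     while lo < hi:
--         mid = (lo + hi) // 2
--         if score >= thresholds[mid]:
--             lo = mid + 1
--         else:
--             hi = mid
--     return grades[lo]
-- ===== Notes on version B (the rewrite author's own statement) =====
-- stated objective: alternative
-- what changed: Instead of accumulating per-item deductions and walking an if-elif grade ladder, B extracts the severity list, computes the score as a closed-form weighted count (5*len + 25*#High + 10*#Medium extra), and picks the grade by binary search over a sorted threshold list.
import Mathlib
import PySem

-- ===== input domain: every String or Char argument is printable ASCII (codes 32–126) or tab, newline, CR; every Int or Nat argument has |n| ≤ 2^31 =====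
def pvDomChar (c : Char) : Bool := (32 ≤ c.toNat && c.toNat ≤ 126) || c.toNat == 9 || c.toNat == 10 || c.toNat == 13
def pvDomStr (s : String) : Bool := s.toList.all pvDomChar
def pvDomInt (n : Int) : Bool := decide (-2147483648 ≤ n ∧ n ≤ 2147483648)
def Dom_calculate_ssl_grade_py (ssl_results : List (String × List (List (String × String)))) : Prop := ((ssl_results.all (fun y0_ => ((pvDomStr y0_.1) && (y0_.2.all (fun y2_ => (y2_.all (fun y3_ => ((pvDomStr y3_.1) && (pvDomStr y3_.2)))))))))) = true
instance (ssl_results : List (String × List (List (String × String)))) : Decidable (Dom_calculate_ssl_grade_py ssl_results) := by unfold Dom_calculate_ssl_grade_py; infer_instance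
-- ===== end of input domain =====

-- B replaces A's per-item deduction accumulation and if/elif grade ladder by a
-- closed-form weighted severity count and a binary search over the grade thresholds
-- (objective: alternative; same cost).

-- ===== PORT A =====
def calculate_ssl_grade_py (ssl_results : List (String × List (List (String × String)))) : String :=
  let d := PySem.Dict.mk ssl_results
  -- `if not ssl_results.get("has_ssl")`: missing key or empty list is falsy
  if d.getD "has_ssl" [] = [] then "F"
  else
    -- vuln["severity"]: on a vuln without the key Python raises KeyError (excluded by Pre_);
    -- the port reads the default "" there, which falls into the else branch
    let score : Int := (d.getD "vulnerabilities" []).foldl (fun score vuln =>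
      let sev := (PySem.Dict.mk vuln).getD "severity" ""
      if sev = "High" then score - 30
      else if sev = "Medium" then score - 15
      else score - 5) 100
    if score ≥ 90 then "A+"
    else if score ≥ 80 then "A"
    else if score ≥ 70 then "B"
    else if score ≥ 60 then "C"
    else if score ≥ 50 then "D"
    else "F"

-- ===== PORT B =====
-- the `while lo < hi` binary-search loop of Source B, as well-founded recursion on hi - lo
def pvBsearch (score : Int) (thresholds : List Int) (lo hi : Nat) : Nat :=
  if _h : lo < hi then
    let mid := (lo + hi) / 2
    -- thresholds[mid]: mid is always in range here, so getD's default is never read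
    if score ≥ thresholds.getD mid 0 then pvBsearch score thresholds (mid + 1) hi
    else pvBsearch score thresholds lo mid
  else lo
termination_by hi - lo
decreasing_by all_goals omega

def calculate_ssl_grade_py_alt (ssl_results : List (String × List (List (String × String)))) : String :=
  let d := PySem.Dict.mk ssl_results
  if d.getD "has_ssl" [] = [] then "F"
  else
    let severities := (d.getD "vulnerabilities" []).map
      (fun v => (PySem.Dict.mk v).getD "severity" "")
    let score : Int := 100 - 5 * severities.length
      - 25 * (PySem.List.count severities "High")
      - 10 * (PySem.List.count severities "Medium")
    let thresholds : List Int := [50, 60, 70, 80, 90]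
    let grades := ["F", "D", "C", "B", "A", "A+"]
    -- grades[lo]: the loop's result lo is always ≤ 5, so getD's default is never read
    grades.getD (pvBsearch score thresholds 0 thresholds.length) "F"

-- ===== PRECONDITION & SPEC =====
-- Pre_ excludes exactly the inputs on which A raises KeyError: has_ssl truthy and some
-- vulnerability dict lacking the "severity" key.
def Pre_calculate_ssl_grade_py (ssl_results : List (String × List (List (String × String)))) : Prop :=
  (PySem.Dict.mk ssl_results).getD "has_ssl" [] ≠ [] →
    ∀ v ∈ (PySem.Dict.mk ssl_results).getD "vulnerabilities" [],
      (PySem.Dict.mk v).contains "severity" = true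
instance (ssl_results : List (String × List (List (String × String)))) : Decidable (Pre_calculate_ssl_grade_py ssl_results) := by unfold Pre_calculate_ssl_grade_py; infer_instance

def pvWitness_calculate_ssl_grade_py : (List (String × List (List (String × String)))) :=
  [("has_ssl", [[("on", "1")]]), ("vulnerabilities", [[("severity", "High")], [("severity", "Low")]])]

def Spec_calculate_ssl_grade_py (ssl_results : List (String × List (List (String × String)))) (out : String) : Prop := out = calculate_ssl_grade_py_alt ssl_results
instance (ssl_results : List (String × List (List (String × String)))) (out : String) : Decidable (Spec_calculate_ssl_grade_py ssl_results out) := by unfold Spec_calculate_ssl_grade_py; infer_instance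

-- ===== CLAIM (what is proved, stated in full; the proofs are below) =====
def Claim_equal_calculate_ssl_grade_py : Prop := ∀ (ssl_results : List (String × List (List (String × String)))), Dom_calculate_ssl_grade_py ssl_results → Pre_calculate_ssl_grade_py ssl_results → Spec_calculate_ssl_grade_py ssl_results (calculate_ssl_grade_py ssl_results)

-- ===== LEMMAS AND PROOFS =====

-- A's deduction fold over the vulnerabilities equals the weighted counts of the
-- severity strings B extracts.
theorem foldl_score (l : List (List (String × String))) (init : Int) :
    l.foldl (fun score vuln =>
      let sev := (PySem.Dict.mk vuln).getD "severity" ""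
      if sev = "High" then score - 30
      else if sev = "Medium" then score - 15
      else score - 5) init
    = init
      - 5 * (l.map (fun v => (PySem.Dict.mk v).getD "severity" "")).length
      - 25 * ((l.map (fun v => (PySem.Dict.mk v).getD "severity" "")).count "High")
      - 10 * ((l.map (fun v => (PySem.Dict.mk v).getD "severity" "")).count "Medium") := by
  induction l generalizing init with
  | nil => simp
  | cons v t ih =>
      simp only [List.foldl_cons, List.map_cons, List.count_cons, ih]
      set sev := (PySem.Dict.mk v).getD "severity" "" with hsev
      by_cases h1 : sev = "High"
      · simp only [h1]
        simp
        ring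
      · by_cases h2 : sev = "Medium"
        · simp only [h2] at *
          simp [h1]
          ring
        · have e1 : (sev == "High") = false := beq_eq_false_iff_ne.mpr h1
          have e2 : (sev == "Medium") = false := beq_eq_false_iff_ne.mpr h2
          simp [h1, h2, e1, e2]
          ring

-- unfolding lemmas for the binary-search loop
theorem bs_step (s : Int) (t : List Int) (lo hi : Nat) (h : lo < hi) :
    pvBsearch s t lo hi =
      if s ≥ t.getD ((lo + hi) / 2) 0 then pvBsearch s t ((lo + hi) / 2 + 1) hi
      else pvBsearch s t lo ((lo + hi) / 2) := by
  rw [pvBsearch]; simp [h]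

theorem bs_done (s : Int) (t : List Int) (lo hi : Nat) (h : ¬ lo < hi) :
    pvBsearch s t lo hi = lo := by
  rw [pvBsearch]; simp [h]

-- the grade ladder equals grades[binary search of score in thresholds], any score
theorem ladder_eq_bsearch (s : Int) :
    (if s ≥ 90 then "A+"
     else if s ≥ 80 then "A"
     else if s ≥ 70 then "B"
     else if s ≥ 60 then "C"
     else if s ≥ 50 then "D"
     else "F")
    = ["F", "D", "C", "B", "A", "A+"].getD (pvBsearch s [50, 60, 70, 80, 90] 0 5) "F" := by
  by_cases h90 : s ≥ 90 <;> by_cases h80 : s ≥ 80 <;> by_cases h70 : s ≥ 70 <;>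
    by_cases h60 : s ≥ 60 <;> by_cases h50 : s ≥ 50 <;>
    first
      | omega
      | simp [bs_step s [50, 60, 70, 80, 90] 0 5 (by omega),
              bs_step s [50, 60, 70, 80, 90] 3 5 (by omega),
              bs_step s [50, 60, 70, 80, 90] 3 4 (by omega),
              bs_step s [50, 60, 70, 80, 90] 0 2 (by omega),
              bs_step s [50, 60, 70, 80, 90] 0 1 (by omega),
              bs_done s [50, 60, 70, 80, 90] 5 5 (by omega),
              bs_done s [50, 60, 70, 80, 90] 4 4 (by omega),
              bs_done s [50, 60, 70, 80, 90] 3 3 (by omega),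
              bs_done s [50, 60, 70, 80, 90] 2 2 (by omega),
              bs_done s [50, 60, 70, 80, 90] 1 1 (by omega),
              bs_done s [50, 60, 70, 80, 90] 0 0 (by omega),
              h90, h80, h70, h60, h50]

theorem calculate_ssl_grade_py_eq_alt (ssl_results : List (String × List (List (String × String)))) :
    calculate_ssl_grade_py ssl_results = calculate_ssl_grade_py_alt ssl_results := by
  unfold calculate_ssl_grade_py calculate_ssl_grade_py_alt
  simp only
  split
  · rfl
  · rw [foldl_score, ladder_eq_bsearch]
    simp [PySem.List.count_eq]

-- ===== VERDICT (by name: the statement is the Claim_ definition above) =====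
theorem calculate_ssl_grade_py_spec : Claim_equal_calculate_ssl_grade_py := by
  intro ssl_results _ _
  exact calculate_ssl_grade_py_eq_alt ssl_results
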